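-- pv_equiv track=rewrite | github.com/jorqueraquentin-lang/MagicOptimizer | HostProject/Plugins/MagicOptimizer/Content/Python/magic_optimizer/io_csv.py | _superset_fieldnames
-- ===== SOURCE A (Python) =====
-- from typing import List, Dict, Any, Optional, Union
--
-- def _superset_fieldnames(preferred: List[str], rows: List[Dict[str, str]]) -> List[str]:
--     """
--     Build a stable superset of fieldnames, preserving the provided order and
--     appending any extra keys found in rows at the end.
--     """
--     preferred_set = set(preferred)
--     extras: List[str] = []
--     for r in rows:
--         for k in r.keys():
--             if k not in preferred_set and k not in extras:
--                 extras.append(k)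
--     return list(preferred) + extras
-- ===== SOURCE B (Python) =====
-- from typing import List, Dict
--
--
-- def _superset_fieldnames(preferred: List[str], rows: List[Dict[str, str]]) -> List[str]:
--     """
--     Build a stable superset of fieldnames: preferred order first, then every
--     extra key found in rows in first-occurrence order, obtained by sorting the
--     set of extra keys by their first position in the flattened key stream.
--     """
--     flat = [k for r in rows for k in r.keys()]
--     extras = sorted(set(flat) - set(preferred), key=flat.index)
--     return list(preferred) + extras
-- ===== Notes on version B (the rewrite author's own statement) =====
-- stated objective: alternative
-- what changed: Replaces A's on-line scan-and-append dedup (membership test against the growing extras list inside the nested loop) by set algebra plus sorting: flatten all row keys once, take the set difference set(flat) - set(preferred), and recover first-occurrence order by sorting those keys by flat.index.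
import Mathlib
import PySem

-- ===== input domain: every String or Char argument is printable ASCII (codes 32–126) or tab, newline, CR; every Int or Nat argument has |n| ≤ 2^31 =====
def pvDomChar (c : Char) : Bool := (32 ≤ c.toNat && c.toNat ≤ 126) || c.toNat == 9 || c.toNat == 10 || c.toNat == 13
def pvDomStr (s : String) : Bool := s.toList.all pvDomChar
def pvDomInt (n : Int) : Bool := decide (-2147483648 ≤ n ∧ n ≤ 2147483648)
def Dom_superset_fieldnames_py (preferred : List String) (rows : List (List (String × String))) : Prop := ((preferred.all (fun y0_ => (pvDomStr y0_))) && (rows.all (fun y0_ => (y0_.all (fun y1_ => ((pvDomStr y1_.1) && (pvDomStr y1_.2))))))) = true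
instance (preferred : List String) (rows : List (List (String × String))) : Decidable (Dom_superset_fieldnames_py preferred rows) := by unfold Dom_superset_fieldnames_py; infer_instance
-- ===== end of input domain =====

-- B: set algebra + sort by first position; same return value as A (alternative decomposition, no speed claim).

-- ===== PORT A =====
-- A: nested loop over rows/keys, appending keys not in the preferred set and not already in extras.
def superset_fieldnames_py (preferred : List String) (rows : List (List (String × String))) : List String :=
  let preferred_set : PySem.Set String := PySem.Set.ofList preferred
  let extras : List String :=
    rows.foldl (fun ex r =>
      (r.map (·.1)).foldl (fun ex k =>
        if !(PySem.Set.contains preferred_set k) && !(List.contains ex k) then ex ++ [k] else ex) ex) []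
  preferred ++ extras

-- ===== PORT B =====
-- B-side helper: flat.index(k) — exact wherever k ∈ flat (index? is some there), which holds
-- for every element B sorts, since they are drawn from set(flat).
def pvIdx {α : Type} [BEq α] (l : List α) (a : α) : Nat := (PySem.List.index? l a).getD 0

-- B: flatten all row keys, set difference against preferred, sort by first position in the flat
-- key stream. (Python iterates the set in hash order; the sort key is injective on the set, so
-- sorted's output is order-independent and the port's first-insertion set order is exact.)
def superset_fieldnames_py_alt (preferred : List String) (rows : List (List (String × String))) : List String :=
  let flat : List String := rows.flatMap (fun r => r.map (·.1))
  let extras : List String :=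
    PySem.List.sorted
      (PySem.Set.diff (PySem.Set.ofList flat) (PySem.Set.ofList preferred))
      (fun k => pvIdx flat k)
  preferred ++ extras

-- ===== PRECONDITION & SPEC =====
def Spec_superset_fieldnames_py (preferred : List String) (rows : List (List (String × String))) (out : List String) : Prop := out = superset_fieldnames_py_alt preferred rows
instance (preferred : List String) (rows : List (List (String × String))) (out : List String) : Decidable (Spec_superset_fieldnames_py preferred rows out) := by unfold Spec_superset_fieldnames_py; infer_instance

-- ===== CLAIM (what is proved, stated in full; the proofs are below) =====
def Claim_equal_superset_fieldnames_py : Prop := ∀ (preferred : List String) (rows : List (List (String × String))), Dom_superset_fieldnames_py preferred rows → Spec_superset_fieldnames_py preferred rows (superset_fieldnames_py preferred rows)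

-- ===== LEMMAS AND PROOFS =====

-- A's inner append-if-new loop is a fold of Set.add over the keys surviving the preferred filter.
theorem extras_foldl_eq_add (pset : PySem.Set String) (ks : List String) (ex : List String) :
    ks.foldl (fun ex k =>
        if !(PySem.Set.contains pset k) && !(List.contains ex k) then ex ++ [k] else ex) ex
    = (ks.filter (fun k => !(PySem.Set.contains pset k))).foldl PySem.Set.add ex := by
  induction ks generalizing ex with
  | nil => rfl
  | cons k ks ih =>
    simp only [List.foldl_cons, List.filter_cons]
    by_cases hp : PySem.Set.contains pset k
    · have h1 : (!(PySem.Set.contains pset k) && !(List.contains ex k)) = false := by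
        simp only [hp, Bool.not_true, Bool.false_and]
      rw [h1, if_neg (by simp), if_neg (by simp only [hp, Bool.not_true]; exact Bool.false_ne_true)]
      exact ih ex
    · simp only [hp, Bool.not_false, Bool.true_and, if_pos]
      rw [List.foldl_cons, ih]
      congr 1
      simp [PySem.Set.add]

-- A's nested loop over rows is the fold over the flattened key list.
theorem foldl_rows_flatMap (rows : List (List (String × String)))
    (f : List String → String → List String) (init : List String) :
    rows.foldl (fun ex r => (r.map (·.1)).foldl f ex) init
    = (rows.flatMap (fun r => r.map (·.1))).foldl f init := by
  induction rows generalizing init with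
  | nil => rfl
  | cons r rows ih => simp [List.foldl_append, ih]

-- dedup commutes with a value-based filter: set-of-filtered = filtered set, in first-occurrence order.
theorem ofList_filter (p : String → Bool) (l : List String) :
    PySem.Set.ofList (l.filter p) = (PySem.Set.ofList l).filter p := by
  induction l using List.reverseRecOn with
  | nil => rfl
  | append_singleton l x ih =>
    rw [List.filter_append, PySem.Set.ofList_eq_foldl, PySem.Set.ofList_eq_foldl,
        List.foldl_append, List.foldl_append, ← PySem.Set.ofList_eq_foldl, ← PySem.Set.ofList_eq_foldl]
    by_cases hx : p x
    · simp only [List.filter_cons, hx, List.filter_nil, if_pos, List.foldl_cons, List.foldl_nil]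
      by_cases hm : x ∈ l
      · rw [PySem.Set.add_of_mem (by rw [PySem.Set.mem_ofList]; exact List.mem_filter.2 ⟨hm, hx⟩),
            PySem.Set.add_of_mem (by rw [PySem.Set.mem_ofList]; exact hm), ih]
      · rw [PySem.Set.add_of_not_mem (by rw [PySem.Set.mem_ofList]; simp [List.mem_filter, hm]),
            PySem.Set.add_of_not_mem (by rw [PySem.Set.mem_ofList]; exact hm),
            List.filter_append, ih]
        simp [hx]
    · simp only [List.filter_cons, hx, List.filter_nil, if_neg, List.foldl_cons, List.foldl_nil,
        Bool.false_eq_true, not_false_iff]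
      rw [ih]
      by_cases hm : x ∈ l
      · rw [PySem.Set.add_of_mem (by rw [PySem.Set.mem_ofList]; exact hm)]
      · rw [PySem.Set.add_of_not_mem (by rw [PySem.Set.mem_ofList]; exact hm), List.filter_append]
        simp [hx]

theorem pvIdx_lt_length {l : List String} {a : String} (h : a ∈ l) : pvIdx l a < l.length := by
  obtain ⟨k, hk⟩ := Option.isSome_iff_exists.mp ((PySem.List.index?_isSome_iff l a).mpr h)
  obtain ⟨hlt, -, -⟩ := PySem.List.getElem_of_index?_eq_some hk
  unfold pvIdx
  rw [hk]
  exact hlt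

theorem pvIdx_append {l : List String} {a : String} (x : String) (h : a ∈ l) :
    pvIdx (l ++ [x]) a = pvIdx l a := by
  simp only [pvIdx]
  rw [PySem.List.index?_append_of_mem _ h]

-- first occurrences of the filtered keys appear in strictly increasing position in l.
theorem pairwise_idx_ofList_filter (p : String → Bool) (l : List String) :
    (PySem.Set.ofList (l.filter p)).Pairwise (fun a b => pvIdx l a < pvIdx l b) := by
  induction l using List.reverseRecOn with
  | nil => simp [PySem.Set.ofList, PySem.Set.empty]
  | append_singleton l x ih =>
    have hsub : ∀ a ∈ PySem.Set.ofList (l.filter p), a ∈ l := fun a ha =>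
      (List.mem_filter.1 ((PySem.Set.mem_ofList (l.filter p) a).1 ha)).1
    have htrans : (PySem.Set.ofList (l.filter p)).Pairwise
        (fun a b => pvIdx (l ++ [x]) a < pvIdx (l ++ [x]) b) := by
      refine List.Pairwise.imp_of_mem ?_ ih
      intro a b ha hb hab
      rw [pvIdx_append x (hsub a ha), pvIdx_append x (hsub b hb)]
      exact hab
    by_cases hx : p x
    · rw [List.filter_append, List.filter_cons, if_pos hx, List.filter_nil,
          PySem.Set.ofList_eq_foldl, List.foldl_append, ← PySem.Set.ofList_eq_foldl,
          List.foldl_cons, List.foldl_nil]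
      by_cases hm : x ∈ l
      · rw [PySem.Set.add_of_mem (by rw [PySem.Set.mem_ofList]; exact List.mem_filter.2 ⟨hm, hx⟩)]
        exact htrans
      · rw [PySem.Set.add_of_not_mem (by rw [PySem.Set.mem_ofList]; simp [List.mem_filter, hm])]
        rw [List.pairwise_append]
        refine ⟨htrans, List.pairwise_singleton _ _, ?_⟩
        intro a ha b hb
        rw [List.mem_singleton] at hb
        rw [hb]
        rw [pvIdx_append x (hsub a ha)]
        have h1 : pvIdx l a < l.length := pvIdx_lt_length (hsub a ha)
        have h2 : pvIdx (l ++ [x]) x = l.length := by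
          simp only [pvIdx]
          rw [PySem.List.index?_append_singleton_self l x hm]
          rfl
        omega
    · rw [List.filter_append, List.filter_cons, if_neg (by simp [hx]), List.filter_nil,
          List.append_nil]
      exact htrans

-- B's sorted set-difference is exactly A's first-occurrence dedup of the filtered key stream.
theorem sorted_diff_eq (preferred flat : List String) :
    PySem.List.sorted
        (PySem.Set.diff (PySem.Set.ofList flat) (PySem.Set.ofList preferred))
        (fun k => pvIdx flat k)
    = PySem.Set.ofList (flat.filter (fun k => !(PySem.Set.contains (PySem.Set.ofList preferred) k))) := by
  apply PySem.List.sorted_eq_of_perm_of_pairwise_lt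
  · have h : PySem.Set.diff (PySem.Set.ofList flat) (PySem.Set.ofList preferred)
        = PySem.Set.ofList (flat.filter (fun k => !(PySem.Set.contains (PySem.Set.ofList preferred) k))) := by
      rw [ofList_filter]
      rfl
    rw [h]
  · exact pairwise_idx_ofList_filter _ _

-- ===== VERDICT (by name: the statement is the Claim_ definition above) =====
theorem superset_fieldnames_py_spec : Claim_equal_superset_fieldnames_py := by
  intro preferred rows _
  unfold Spec_superset_fieldnames_py superset_fieldnames_py superset_fieldnames_py_alt
  simp only
  congr 1
  rw [foldl_rows_flatMap, extras_foldl_eq_add, ← PySem.Set.ofList_eq_foldl, sorted_diff_eq]
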